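-- pv_equiv track=rewrite | github.com/whock3/ratterdam | RatterdamOpen_Project/repetition_naturalTrajectories.py | assembleNextLevel
-- ===== SOURCE A (Python) =====
-- import itertools
--
-- def checkOverlap(x,y):
--     """
--     Input two lists, length 3 or greater
--     Assume x comes before y in a trajectory
--     check if they overlap.
--
--     E.g. x = ['16', '2', '0'], y = ['2', '0', '4']
--     These do overlap by our definition - the interiors (removing first
--      element of x and last element of y) are identical. In general the
--     length n vectors will overlap if their len n-1 interiors are identical.
--     But you need to check the order. e.g. inputting the arguments in this
--     example in reverse would not lead to overlap.
--     """
--     interiorX, interiorY = x[1:], y[:-1]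
--     if interiorX == interiorY:
--         return True
--     else:
--         return False
--
-- def assemble(trA, trB):
--     """
--     Inputs trA, trB are lists of alleys as strings e.g ['0', '2', '4']
--     They represent trajctories or building blocks thereof
--     Fx checks to see if they can be combined. Where that is defined as
--     the interiors overlap and so they are two pieces of a bigger trajectory
--
--     E.g. trA = ['16', '2', '0'], trB = ['2', '0', '4']
--     These are defined to be pieces of a larger traj because they overlap
--     in the interior (in order trA > trB)
--     """
--
--     test_a_b = checkOverlap(trA, trB) # check if the building blocks form a traj trA>trB
--     test_b_a = checkOverlap(trB, trA) # '' but for trB > trA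
--
--     if test_a_b == True:
--         assembledtraj = trA + [trB[-1]]
--     elif test_b_a == True:
--         assembledtraj = trB + [trA[-1]]
--     else:
--         assembledtraj = None
--
--     return assembledtraj
--
-- def assembleNextLevel(struct):
--     """
--     Input - struct is a list of lists. Each sublist is a trajectory represented
--     as a list of strings of the alleys in the trajectory.
--     Ex. struct = [['0','2','4'],['5','6','7']]
--     Lists may not be of the same length
--
--     Each list element is compared to all others to see if they form a bigger
--     trajectory. Uses assemble() (which uses checkOverlap()) to do so.
--
--     Returns a new lists of lists where the list elements are the new, assembled
--     trajectories from the inputs. Duplicates are removed.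
--     """
--     newTrajectories = []
--     for trajA in struct:
--         for trajB in struct:
--             output = assemble(trajA, trajB)
--             if output is not None:
--                 newTrajectories.append(output)
--
--     if newTrajectories != []:
--         newTrajectories.sort()
--         # this is a clever way (meaning I got it from SO) of removing duplicates in a list of lists
--         newTrajectories = list(k for k,_ in itertools.groupby(newTrajectories))
--
--     return newTrajectories
-- ===== SOURCE B (Python) =====
-- def assembleNextLevel(struct):
--     by_prefix = {}
--     for t in struct:
--         by_prefix.setdefault(tuple(t[:-1]), []).append(t)
--     seen = set()
--     for a in struct:
--         for b in by_prefix.get(tuple(a[1:]), []):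
--             seen.add(tuple(a) + (b[-1],))
--     return [list(t) for t in sorted(seen)]
-- ===== Notes on version B (the rewrite author's own statement) =====
-- stated objective: faster
-- what changed: Replaces the all-pairs quadratic scan with a hash join: trajectories are bucketed by interior prefix traj[:-1], each traj joins only its matching bucket via lookup of traj[1:], and a set plus one final sort replaces sort-then-groupby dedup.
import Mathlib
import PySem

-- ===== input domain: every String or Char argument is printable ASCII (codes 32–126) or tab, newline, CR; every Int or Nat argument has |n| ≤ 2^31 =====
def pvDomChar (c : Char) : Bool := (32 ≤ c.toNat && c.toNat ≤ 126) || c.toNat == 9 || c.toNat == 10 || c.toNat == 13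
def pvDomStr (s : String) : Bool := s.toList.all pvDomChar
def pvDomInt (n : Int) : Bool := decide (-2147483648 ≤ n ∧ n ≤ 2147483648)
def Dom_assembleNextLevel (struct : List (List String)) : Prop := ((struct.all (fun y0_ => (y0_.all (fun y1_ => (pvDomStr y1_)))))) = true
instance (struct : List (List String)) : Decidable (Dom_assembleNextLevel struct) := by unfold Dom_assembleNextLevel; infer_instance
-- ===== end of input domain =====

-- B replaces A's all-pairs scan by a hash join on the interior prefix plus a set and one sort (objective: faster).

-- sort key: the code-point view of each trajectory; order-isomorphic to Python's
-- list-of-str comparison (String '<' is code-point lexicographic) and kernel-reducible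
def pvKey (x : List String) : List (List Char) := x.map String.toList

-- ===== PORT A =====
def checkOverlap (x y : List String) : Bool :=
  let interiorX := PySem.List.slice x (some 1) none
  let interiorY := PySem.List.slice y none (some (-1))
  if interiorX = interiorY then true else false

def assemble (trA trB : List String) : Option (List String) :=
  let test_a_b := checkOverlap trA trB
  let test_b_a := checkOverlap trB trA
  if test_a_b = true then some (trA ++ [PySem.List.pyGetD trB (-1) ""])
  else if test_b_a = true then some (trB ++ [PySem.List.pyGetD trA (-1) ""])
  else none

-- exact port of 'list(k for k,_ in itertools.groupby(lst))': the keys of the groups,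
-- i.e. runs of adjacent duplicates collapsed to their first element
def groupbyKeys (l : List (List String)) : List (List String) :=
  match l with
  | [] => []
  | [x] => [x]
  | x :: y :: t => if x = y then groupbyKeys (y :: t) else x :: groupbyKeys (y :: t)

def assembleNextLevel (struct : List (List String)) : List (List String) :=
  let newTrajectories := struct.foldl (fun acc trajA =>
      struct.foldl (fun acc2 trajB =>
        match assemble trajA trajB with
        | some output => acc2 ++ [output]
        | none => acc2) acc) []
  if newTrajectories ≠ [] then
    groupbyKeys (PySem.List.sorted newTrajectories pvKey false)
  else newTrajectories

-- ===== PORT B =====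
def assembleNextLevel_alt (struct : List (List String)) : List (List String) :=
  let byPrefix := struct.foldl (fun d t =>
      PySem.Dict.modify d (PySem.List.slice t none (some (-1))) [] (· ++ [t]))
    PySem.Dict.empty
  let seen : PySem.Set (List String) := struct.foldl (fun s a =>
      (PySem.Dict.getD byPrefix (PySem.List.slice a (some 1) none) []).foldl
        (fun s2 b => PySem.Set.add s2 (a ++ [PySem.List.pyGetD b (-1) ""])) s)
    PySem.Set.empty
  PySem.List.sorted seen pvKey false

-- ===== PRECONDITION & SPEC =====
-- Pre_ excludes structs containing an empty trajectory: there Python A raises IndexError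
-- (trB[-1] on the empty list), and Python B raises IndexError there as well.
def Pre_assembleNextLevel (struct : List (List String)) : Prop := ∀ t ∈ struct, t ≠ []
instance (struct : List (List String)) : Decidable (Pre_assembleNextLevel struct) := by
  unfold Pre_assembleNextLevel; infer_instance

def pvWitness_assembleNextLevel : List (List String) := [["16", "2", "0"], ["2", "0", "4"]]

def Spec_assembleNextLevel (struct : List (List String)) (out : List (List String)) : Prop := out = assembleNextLevel_alt struct
instance (struct : List (List String)) (out : List (List String)) : Decidable (Spec_assembleNextLevel struct out) := by unfold Spec_assembleNextLevel; infer_instance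

-- ===== CLAIM (what is proved, stated in full; the proofs are below) =====
def Claim_equal_assembleNextLevel : Prop := ∀ (struct : List (List String)), Dom_assembleNextLevel struct → Pre_assembleNextLevel struct → Spec_assembleNextLevel struct (assembleNextLevel struct)

-- ===== LEMMAS AND PROOFS =====

-- proof-only abbreviations for the two intermediate collections of the ports
def newT (struct : List (List String)) : List (List String) :=
  struct.foldl (fun acc trajA =>
      struct.foldl (fun acc2 trajB =>
        match assemble trajA trajB with
        | some output => acc2 ++ [output]
        | none => acc2) acc) []

def seenT (struct : List (List String)) : PySem.Set (List String) :=
  struct.foldl (fun s a =>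
      (PySem.Dict.getD (struct.foldl (fun d t =>
          PySem.Dict.modify d (PySem.List.slice t none (some (-1))) [] (· ++ [t]))
        PySem.Dict.empty) (PySem.List.slice a (some 1) none) []).foldl
        (fun s2 b => PySem.Set.add s2 (a ++ [PySem.List.pyGetD b (-1) ""])) s)
    PySem.Set.empty

theorem assembleNextLevel_eq (struct : List (List String)) :
    assembleNextLevel struct =
      if newT struct ≠ [] then groupbyKeys (PySem.List.sorted (newT struct) pvKey false)
      else newT struct := rfl

theorem assembleNextLevel_alt_eq (struct : List (List String)) :
    assembleNextLevel_alt struct = PySem.List.sorted (seenT struct) pvKey false := rfl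

theorem pvKey_injective : Function.Injective pvKey := by
  intro a b h
  exact List.map_injective_iff.mpr (fun _ _ hst => String.toList_injective hst) h

theorem checkOverlap_def (x y : List String) :
    checkOverlap x y =
      decide (PySem.List.slice x (some 1) none = PySem.List.slice y none (some (-1))) := rfl

theorem checkOverlap_eq_true_iff (x y : List String) :
    checkOverlap x y = true ↔ x.tail = y.dropLast := by
  rw [checkOverlap_def, PySem.List.slice_from_one, PySem.List.slice_to_neg_one]
  exact decide_eq_true_iff

theorem assemble_def (a b : List String) :
    assemble a b =
      if checkOverlap a b = true then some (a ++ [PySem.List.pyGetD b (-1) ""])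
      else if checkOverlap b a = true then some (b ++ [PySem.List.pyGetD a (-1) ""])
      else none := rfl

theorem assemble_eq_some_iff (a b x : List String) :
    assemble a b = some x ↔
      (a.tail = b.dropLast ∧ x = a ++ [PySem.List.pyGetD b (-1) ""]) ∨
      (a.tail ≠ b.dropLast ∧ b.tail = a.dropLast ∧ x = b ++ [PySem.List.pyGetD a (-1) ""]) := by
  rw [assemble_def]
  split_ifs with h1 h2
  · rw [checkOverlap_eq_true_iff] at h1
    constructor
    · intro hx
      exact Or.inl ⟨h1, (Option.some.inj hx).symm⟩
    · rintro (⟨_, rfl⟩ | ⟨hn, _, _⟩)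
      · rfl
      · exact absurd h1 hn
  · rw [checkOverlap_eq_true_iff] at h1 h2
    constructor
    · intro hx
      exact Or.inr ⟨h1, h2, (Option.some.inj hx).symm⟩
    · rintro (⟨ho, _⟩ | ⟨_, _, rfl⟩)
      · exact absurd ho h1
      · rfl
  · rw [checkOverlap_eq_true_iff] at h1 h2
    constructor
    · intro hx
      exact hx.elim
    · rintro (⟨ho, _⟩ | ⟨_, ho', _⟩)
      · exact absurd ho h1
      · exact absurd ho' h2

theorem mem_foldA_inner (a x : List String) (l : List (List String)) :
    ∀ acc : List (List String), x ∈ l.foldl (fun acc2 trajB =>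
        match assemble a trajB with
        | some output => acc2 ++ [output]
        | none => acc2) acc ↔ x ∈ acc ∨ ∃ b ∈ l, assemble a b = some x := by
  induction l with
  | nil => intro acc; simp
  | cons hd tl ih =>
    intro acc
    rw [List.foldl_cons, ih, List.exists_mem_cons_iff]
    rcases h : assemble a hd with _ | o
    · simp
    · simp only [List.mem_append, List.mem_singleton]

      constructor
      · rintro ((hx | rfl) | hb)
        · exact Or.inl hx
        · exact Or.inr (Or.inl rfl)
        · exact Or.inr (Or.inr hb)
      · rintro (hx | hhd | hb)
        · exact Or.inl (Or.inl hx)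
        · exact Or.inl (Or.inr (Option.some.inj hhd).symm)
        · exact Or.inr hb

theorem mem_foldA_outer (struct : List (List String)) (x : List String)
    (l : List (List String)) :
    ∀ acc : List (List String), x ∈ l.foldl (fun acc trajA =>
        struct.foldl (fun acc2 trajB =>
          match assemble trajA trajB with
          | some output => acc2 ++ [output]
          | none => acc2) acc) acc ↔
      x ∈ acc ∨ ∃ a ∈ l, ∃ b ∈ struct, assemble a b = some x := by
  induction l with
  | nil => intro acc; simp
  | cons hd tl ih =>
    intro acc
    rw [List.foldl_cons, ih, mem_foldA_inner, List.exists_mem_cons_iff]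
    exact or_assoc

theorem bucket_eq (struct : List (List String)) (k : List String) :
    PySem.Dict.getD (struct.foldl (fun d t =>
        PySem.Dict.modify d (PySem.List.slice t none (some (-1))) [] (· ++ [t]))
      PySem.Dict.empty) k [] = struct.filter (fun t => t.dropLast == k) := by
  have h1 : (struct.foldl (fun d t =>
        PySem.Dict.modify d (PySem.List.slice t none (some (-1))) [] (· ++ [t]))
      PySem.Dict.empty) =
      ((struct.map (fun t => (t.dropLast, t))).foldl
        (fun d p => PySem.Dict.modify d p.1 [] (· ++ [p.2])) PySem.Dict.empty) := by
    rw [List.foldl_map]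
    simp only [PySem.List.slice_to_neg_one]
  rw [h1, PySem.Dict.getD_foldl_modify_append]
  simp [List.filter_map, List.map_map, Function.comp_def]

theorem nodup_fold_add {α β : Type} [BEq α] [LawfulBEq α] (f : β → α) (l : List β) :
    ∀ s : PySem.Set α, s.Nodup → (l.foldl (fun s2 b => PySem.Set.add s2 (f b)) s).Nodup := by
  induction l with
  | nil => intro s hs; exact hs
  | cons hd tl ih => intro s hs; exact ih _ (PySem.Set.nodup_add _ _ hs)

theorem mem_seenT (struct : List (List String)) (x : List String)
    (l : List (List String)) :
    ∀ s : PySem.Set (List String), x ∈ l.foldl (fun s a =>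
        (PySem.Dict.getD (struct.foldl (fun d t =>
            PySem.Dict.modify d (PySem.List.slice t none (some (-1))) [] (· ++ [t]))
          PySem.Dict.empty) (PySem.List.slice a (some 1) none) []).foldl
          (fun s2 b => PySem.Set.add s2 (a ++ [PySem.List.pyGetD b (-1) ""])) s) s ↔
      x ∈ s ∨ ∃ a ∈ l, ∃ b ∈ struct, b.dropLast = a.tail ∧
        x = a ++ [PySem.List.pyGetD b (-1) ""] := by
  induction l with
  | nil => intro s; simp
  | cons hd tl ih =>
    intro s
    rw [List.foldl_cons, ih, PySem.Set.mem_foldl_add, List.exists_mem_cons_iff,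
      bucket_eq, PySem.List.slice_from_one]
    simp only [List.mem_filter, beq_iff_eq, and_assoc, or_assoc]

theorem nodup_seenT (struct : List (List String)) (l : List (List String)) :
    ∀ s : PySem.Set (List String), s.Nodup → (l.foldl (fun s a =>
        (PySem.Dict.getD (struct.foldl (fun d t =>
            PySem.Dict.modify d (PySem.List.slice t none (some (-1))) [] (· ++ [t]))
          PySem.Dict.empty) (PySem.List.slice a (some 1) none) []).foldl
          (fun s2 b => PySem.Set.add s2 (a ++ [PySem.List.pyGetD b (-1) ""])) s) s).Nodup := by
  induction l with
  | nil => intro s hs; exact hs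
  | cons hd tl ih =>
    intro s hs
    exact ih _ (nodup_fold_add _ _ _ hs)

theorem mem_newT_iff_mem_seenT (struct : List (List String)) (x : List String) :
    x ∈ newT struct ↔ x ∈ seenT struct := by
  unfold newT seenT
  rw [mem_foldA_outer, mem_seenT]
  simp only [PySem.Set.empty, List.not_mem_nil, false_or]
  constructor
  · rintro ⟨a, ha, b, hb, hab⟩
    rcases (assemble_eq_some_iff a b x).mp hab with ⟨h1, h2⟩ | ⟨h1, h2, h3⟩
    · exact ⟨a, ha, b, hb, h1.symm, h2⟩
    · exact ⟨b, hb, a, ha, h2.symm, h3⟩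
  · rintro ⟨a, ha, b, hb, h1, h2⟩
    exact ⟨a, ha, b, hb, (assemble_eq_some_iff a b x).mpr (Or.inl ⟨h1.symm, h2⟩)⟩

theorem mem_groupbyKeys (x : List String) : ∀ l, x ∈ groupbyKeys l ↔ x ∈ l := by
  intro l
  induction l with
  | nil => simp [groupbyKeys]
  | cons hd tl ih =>
    match tl, ih with
    | [], _ => simp [groupbyKeys]
    | y :: t, ih =>
      by_cases h : hd = y <;> simp [groupbyKeys, h, ih]

theorem pairwise_groupbyKeys : ∀ l : List (List String),
    l.Pairwise (fun a b => pvKey a ≤ pvKey b) →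
    (groupbyKeys l).Pairwise (fun a b => pvKey a < pvKey b) := by
  intro l
  induction l with
  | nil => intro _; simp [groupbyKeys]
  | cons hd tl ih =>
    match tl, ih with
    | [], _ => intro _; simp [groupbyKeys]
    | y :: t, ih =>
      intro hp
      rw [List.pairwise_cons] at hp
      obtain ⟨hhd, hp⟩ := hp
      by_cases h : hd = y
      · simpa [groupbyKeys, h] using ih hp
      · rw [groupbyKeys]
        simp only [if_neg h]
        refine List.pairwise_cons.mpr ⟨?_, ih hp⟩
        intro z hz
        rw [mem_groupbyKeys] at hz
        have hle : pvKey hd ≤ pvKey z := hhd z hz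
        rcases List.mem_cons.mp hz with rfl | hz'
        · exact lt_of_le_of_ne hle (fun he => h (pvKey_injective he))
        · have h1 : pvKey hd ≤ pvKey y := hhd y List.mem_cons_self
          have h2 : pvKey y ≤ pvKey z := (List.pairwise_cons.mp hp).1 z hz'
          exact lt_of_lt_of_le (lt_of_le_of_ne h1 (fun he => h (pvKey_injective he))) h2

theorem strict_sorted_eq : ∀ (l₁ l₂ : List (List String)),
    l₁.Pairwise (fun a b => pvKey a < pvKey b) →
    l₂.Pairwise (fun a b => pvKey a < pvKey b) →
    (∀ x, x ∈ l₁ ↔ x ∈ l₂) → l₁ = l₂ := by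
  intro l₁
  induction l₁ with
  | nil =>
    intro l₂ _ _ hm
    cases l₂ with
    | nil => rfl
    | cons b t₂ => exact absurd ((hm b).mpr List.mem_cons_self) List.not_mem_nil
  | cons a t₁ ih =>
    intro l₂ h1 h2 hm
    cases l₂ with
    | nil => exact absurd ((hm a).mp List.mem_cons_self) List.not_mem_nil
    | cons b t₂ =>
      rw [List.pairwise_cons] at h1 h2
      have hab : a = b := by
        rcases List.mem_cons.mp ((hm a).mp List.mem_cons_self) with h | h
        · exact h
        · rcases List.mem_cons.mp ((hm b).mpr List.mem_cons_self) with h' | h'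
          · exact h'.symm
          · exact absurd (h2.1 a h) (lt_asymm (h1.1 b h'))
      subst hab
      have ht : ∀ x, x ∈ t₁ ↔ x ∈ t₂ := by
        intro x
        constructor
        · intro hx
          rcases List.mem_cons.mp ((hm x).mp (List.mem_cons_of_mem _ hx)) with h | h
          · subst h; exact absurd (h1.1 x hx) (lt_irrefl _)
          · exact h
        · intro hx
          rcases List.mem_cons.mp ((hm x).mpr (List.mem_cons_of_mem _ hx)) with h | h
          · subst h; exact absurd (h2.1 x hx) (lt_irrefl _)
          · exact h
      rw [ih t₂ h1.2 h2.2 ht]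

-- the Pairwise lemmas about sorted are stated with the LinearOrder instances; the ports
-- elaborate with core's defeq List instances — this bridge moves between the two
theorem sortedLin_eq (xs : List (List String)) :
    @PySem.List.sorted (List String) (List (List Char)) List.instLinearOrder.toLT
      LinearOrder.toDecidableLT xs pvKey false = PySem.List.sorted xs pvKey false := by
  have hD : (LinearOrder.toDecidableLT : DecidableLT (List (List Char))) =
      (fun a b => List.decidableLT a b) := by
    funext a b
    exact Subsingleton.elim _ _
  rw [hD]

-- ===== VERDICT (by name: the statement is the Claim_ definition above) =====
theorem assembleNextLevel_spec : Claim_equal_assembleNextLevel := by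
  intro struct _ _
  unfold Spec_assembleNextLevel
  rw [assembleNextLevel_eq, assembleNextLevel_alt_eq]
  by_cases h : newT struct = []
  · have hseen : seenT struct = [] := by
      rw [List.eq_nil_iff_forall_not_mem]
      intro x hx
      rw [← mem_newT_iff_mem_seenT, h] at hx
      exact List.not_mem_nil hx
    rw [if_neg (by simpa using h), hseen, h]
    rfl
  · rw [if_pos h]
    apply strict_sorted_eq
    · exact pairwise_groupbyKeys _
        ((sortedLin_eq (newT struct)) ▸ PySem.List.sorted_pairwise (newT struct) pvKey)
    · have hnd : (seenT struct).Nodup := nodup_seenT struct struct _ List.nodup_nil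
      have hnds := (PySem.List.sorted_perm (seenT struct) pvKey false).symm.nodup hnd
      have hne : List.Pairwise (fun a b => a ≠ b)
          (PySem.List.sorted (seenT struct) pvKey false) := hnds
      have hle := (sortedLin_eq (seenT struct)) ▸
        PySem.List.sorted_pairwise (seenT struct) pvKey
      exact (hle.and hne).imp
        (fun hab => lt_of_le_of_ne hab.1 (fun he => hab.2 (pvKey_injective he)))
    · intro x
      rw [mem_groupbyKeys, PySem.List.mem_sorted, PySem.List.mem_sorted,
        mem_newT_iff_mem_seenT]
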